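-- pv_equiv track=rewrite | github.com/mhrmehedibro-netizen/mhrtools | cf_auto_dns_v10_8_full_stable.py | split_into_three_chunks
-- ===== SOURCE A (Python) =====
-- def split_into_three_chunks(lst):
--     # up to 3 chunks, nearly even
--     result_chunks = []
--     if not lst:
--         return result_chunks
--
--     n = len(lst)
--     if n <= 3:
--         # each item alone OR single chunk? You wanted 3 groups style,
--         # but if small we'll still just create 1..n groups separated with blank lines
--         for item in lst:
--             result_chunks.append([item])
--         return result_chunks
--
--     base = n // 3
--     rem  = n % 3
--     sizes = []
--     for _ in range(3):
--         sz = base + (1 if rem>0 else 0)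
--         if sz > 0:
--             sizes.append(sz)
--             rem -= 1
--
--     i = 0
--     for sz in sizes:
--         result_chunks.append(lst[i:i+sz])
--         i += sz
--     return result_chunks
-- ===== SOURCE B (Python) =====
-- def split_into_three_chunks(lst):
--     q, r = divmod(len(lst), 3)
--
--     def bound(i):
--         return i * q + min(i, r)
--
--     return [lst[bound(i):bound(i + 1)] for i in range(3) if bound(i) < bound(i + 1)]
-- ===== Notes on version B (the rewrite author's own statement) =====
-- stated objective: simpler
-- what changed: Replaces A's n<=3 special case, the rem-decrementing sizes loop and the running-offset slicing loop with one closed-form boundary formula bound(i)=i*q+min(i,r) and a single filtered comprehension.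
import Mathlib
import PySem

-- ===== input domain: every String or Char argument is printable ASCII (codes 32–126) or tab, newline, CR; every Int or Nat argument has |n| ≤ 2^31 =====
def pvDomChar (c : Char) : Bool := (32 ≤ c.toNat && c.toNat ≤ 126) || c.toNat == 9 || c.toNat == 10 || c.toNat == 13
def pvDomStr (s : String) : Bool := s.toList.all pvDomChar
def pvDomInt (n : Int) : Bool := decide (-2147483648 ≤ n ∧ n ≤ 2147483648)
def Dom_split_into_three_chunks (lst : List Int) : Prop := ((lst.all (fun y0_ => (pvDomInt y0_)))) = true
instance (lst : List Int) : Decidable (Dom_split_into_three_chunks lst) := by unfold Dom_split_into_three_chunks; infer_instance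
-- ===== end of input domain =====

-- B replaces A's n<=3 special case, rem-decrementing sizes loop and running-offset
-- slicing loop with closed-form chunk boundaries and one filtered comprehension (simpler).

-- ===== PORT A =====
def split_into_three_chunks (lst : List Int) : List (List Int) :=
  if lst = [] then []
  else
    let n : Int := lst.length
    if n ≤ 3 then
      lst.foldl (fun acc item => acc ++ [[item]]) []
    else
      let base := PySem.Int.floordiv n 3
      -- for _ in range(3): accumulate (sizes, rem)
      let p := (PySem.List.pyRange 0 3 1).foldl
        (fun (st : List Int × Int) _ =>
          let sz := base + (if st.2 > 0 then (1 : Int) else 0)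
          if sz > 0 then (st.1 ++ [sz], st.2 - 1) else st)
        ([], PySem.Int.mod n 3)
      -- for sz in sizes: append lst[i:i+sz]; i += sz
      let q := p.1.foldl
        (fun (st : List (List Int) × Int) sz =>
          (st.1 ++ [PySem.List.slice lst (some st.2) (some (st.2 + sz))], st.2 + sz))
        ([], 0)
      q.1

-- ===== PORT B =====
-- bound(i) = i*q + min(i, r)
def pvBound (q r i : Int) : Int := i * q + min i r

def split_into_three_chunks_alt (lst : List Int) : List (List Int) :=
  let n : Int := lst.length
  let q := PySem.Int.floordiv n 3
  let r := PySem.Int.mod n 3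
  ((PySem.List.pyRange 0 3 1).filter
      (fun i => decide (pvBound q r i < pvBound q r (i + 1)))).map
    (fun i => PySem.List.slice lst (some (pvBound q r i)) (some (pvBound q r (i + 1))))

-- ===== PRECONDITION & SPEC =====
def Spec_split_into_three_chunks (lst : List Int) (out : List (List Int)) : Prop := out = split_into_three_chunks_alt lst
instance (lst : List Int) (out : List (List Int)) : Decidable (Spec_split_into_three_chunks lst out) := by unfold Spec_split_into_three_chunks; infer_instance

-- ===== CLAIM (what is proved, stated in full; the proofs are below) =====
def Claim_equal_split_into_three_chunks : Prop := ∀ (lst : List Int), Dom_split_into_three_chunks lst → Spec_split_into_three_chunks lst (split_into_three_chunks lst)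

-- ===== LEMMAS AND PROOFS =====

lemma pyRange03 : PySem.List.pyRange 0 3 1 = [0, 1, 2] := by decide

lemma small_case (lst : List Int) (h : lst.length ≤ 3) :
    split_into_three_chunks lst = split_into_three_chunks_alt lst := by
  rcases lst with _ | ⟨a, _ | ⟨b, _ | ⟨c, _ | ⟨d, t⟩⟩⟩⟩
  · decide
  · simp [split_into_three_chunks, split_into_three_chunks_alt, pvBound, pyRange03,
      PySem.Int.mod, PySem.Int.floordiv, PySem.List.slice, PySem.List.clampIdx]
  · simp [split_into_three_chunks, split_into_three_chunks_alt, pvBound, pyRange03,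
      PySem.Int.mod, PySem.Int.floordiv, PySem.List.slice, PySem.List.clampIdx]
  · simp [split_into_three_chunks, split_into_three_chunks_alt, pvBound, pyRange03,
      PySem.Int.mod, PySem.Int.floordiv, PySem.List.slice, PySem.List.clampIdx]
  · simp at h; omega

lemma big_case (lst : List Int) (h : 4 ≤ lst.length) :
    split_into_three_chunks lst = split_into_three_chunks_alt lst := by
  have hne : lst ≠ [] := by intro e; simp [e] at h
  have h3 : ¬ ((lst.length : Int) ≤ 3) := by omega
  obtain ⟨k, r, hr3, hk, hN⟩ : ∃ k r, r < 3 ∧ 1 ≤ k ∧ lst.length = 3*k + r :=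
    ⟨lst.length/3, lst.length%3, by omega, by omega, by omega⟩
  simp only [split_into_three_chunks, split_into_three_chunks_alt, if_neg hne, if_neg h3,
    pyRange03,
    PySem.Int.floordiv_eq_ediv_of_pos (b := 3) (by norm_num),
    PySem.Int.mod_eq_emod_of_pos (b := 3) (by norm_num)]
  have hq : ((lst.length : Int)) / 3 = (k : Int) := by omega
  have hr : ((lst.length : Int)) % 3 = (r : Int) := by omega
  rw [hq, hr]
  have hk0 : 0 < k := by omega
  interval_cases r
  · simp only [List.foldl, List.filter, pvBound]
    norm_num [hk0]
    rw [show ((k:Int) + k + k) = 3 * k by ring, show ((k:Int) + k) = 2 * k by ring]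
    exact ⟨rfl, rfl⟩
  · simp only [List.foldl, List.filter, pvBound]
    norm_num [hk0]
    rw [show ((k:Int) + 1 + k + k) = 3 * k + 1 by ring, show ((k:Int) + 1 + k) = 2 * k + 1 by ring]
    exact ⟨rfl, rfl⟩
  · simp only [List.foldl, List.filter, pvBound]
    norm_num [hk0]
    rw [decide_eq_true (show ((k:Int) + 1 < 2 * k + 2) by omega)]
    norm_num
    rw [show ((k:Int) + 1 + (k + 1) + k) = 3 * k + 2 by ring, show ((k:Int) + 1 + (k + 1)) = 2 * k + 2 by ring]
    exact ⟨rfl, rfl⟩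

-- ===== VERDICT (by name: the statement is the Claim_ definition above) =====
theorem split_into_three_chunks_spec : Claim_equal_split_into_three_chunks := by
  intro lst _
  unfold Spec_split_into_three_chunks
  by_cases h : 4 ≤ lst.length
  · exact big_case lst h
  · exact small_case lst (by omega)
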